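-- pv_equiv track=rewrite | github.com/wojmichaluk/WDI-2022-2023 | rozwiązania zestawów/zestaw 4/4.12.py | find
-- ===== SOURCE A (Python) =====
-- def is_prime(n):
--     if n==2:
--         return True
--     elif n%2==0:
--         return False
--     else:
--         i=3
--         while i*i<=n:
--             if n%i==0:
--                 return False
--             i+=2
--         return True
--
-- def is_not_prime(n):
--     if n==0 or n==1:
--         return False
--     else:
--         return not is_prime(n)
--
-- def condition(T,x,y,z):
--     cnt=0
--     for i,j in [(x+1,y), (x-1,y), (x,y-1), (x,y+1), (x+1,y+1), (x+1,y-1), (x-1,y-1), (x-1,y+1)]: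
--         if T[i][j][z]:
--             cnt+=1
--     return cnt
--
-- def find(T):
--     n=len(T)
--     for i in range(n):
--         for j in range(n):
--             for k in range(n):
--                 T[i][j][k]=is_not_prime(T[i][j][k])
--     level_count=-1
--     for z in range(n):
--         curr_count=0
--         for x in range(1,n-1):
--             for y in range(1,n-1):
--                 nbh=condition(T,x,y,z)
--                 if nbh>=6:
--                     curr_count+=1
--         if level_count==-1:
--             level_count=curr_count
--         else:
--             if level_count!=curr_count:
--                 return False
--     return True
-- ===== SOURCE B (Python) =====
-- def is_prime(n):
--     if n==2:
--         return True
--     elif n%2==0: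
--         return False
--     else:
--         i=3
--         while i*i<=n:
--             if n%i==0:
--                 return False
--             i+=2
--         return True
--
-- def is_not_prime(n):
--     if n==0 or n==1:
--         return False
--     else:
--         return not is_prime(n)
--
-- def find(T):
--     n = len(T)
--     for i in range(n):
--         for j in range(n):
--             for k in range(n):
--                 T[i][j][k] = is_not_prime(T[i][j][k])
--     counts = []
--     for z in range(n):
--         # 0/1 indicator slice of level z, then horizontal triple sums,
--         # so each cell's 8-neighbour count is 3 row sums minus the center
--         S = [[1 if T[x][y][z] else 0 for y in range(n)] for x in range(n)]
--         H = [[S[x][y-1] + S[x][y] + S[x][y+1] for y in range(1, n-1)] for x in range(n)]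
--         c = 0
--         for x in range(1, n-1):
--             for y in range(1, n-1):
--                 if H[x-1][y-1] + H[x][y-1] + H[x+1][y-1] - S[x][y] >= 6:
--                     c += 1
--         counts.append(c)
--     return all(c == counts[0] for c in counts) if counts else True
-- ===== Notes on version B (the rewrite author's own statement) =====
-- stated objective: alternative
-- what changed: B replaces the per-cell 8-neighbour probe with, per level, a precomputed 0/1 indicator slice and a table of horizontal triple sums so each neighbour count is 3 row-sum lookups minus the center, and it collects per-level counts into a list checked for all-equal instead of early-returning.
import Mathlib
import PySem

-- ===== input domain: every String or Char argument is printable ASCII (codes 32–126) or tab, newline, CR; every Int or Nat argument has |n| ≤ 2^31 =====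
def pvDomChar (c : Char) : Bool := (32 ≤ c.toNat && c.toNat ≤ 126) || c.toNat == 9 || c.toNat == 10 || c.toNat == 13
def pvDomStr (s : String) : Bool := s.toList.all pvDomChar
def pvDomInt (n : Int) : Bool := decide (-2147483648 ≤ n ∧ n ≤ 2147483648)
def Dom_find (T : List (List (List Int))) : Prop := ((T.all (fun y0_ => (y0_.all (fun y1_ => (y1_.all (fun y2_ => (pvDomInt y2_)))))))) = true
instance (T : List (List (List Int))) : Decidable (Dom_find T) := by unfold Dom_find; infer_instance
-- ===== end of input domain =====

-- B keeps A's in-place prime-marking pass but replaces the per-cell 8-neighbour probe with a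
-- precomputed 0/1 slice plus horizontal triple-sum table per level, and checks an all-equal counts
-- list instead of early-returning (alternative decomposition, same cost). A mutates its argument in
-- place (B performs the same mutation); the equivalence proved here is about the RETURN value.

-- ===== PORT A =====
-- read T[i][j][k]; the default is never reached under Pre_find (all accesses are in range there)
def getCell (T : List (List (List Int))) (i j k : Int) : Int :=
  PySem.List.pyGetD (PySem.List.pyGetD (PySem.List.pyGetD T i []) j []) k 0

-- T[i][j][k] = v  (in-place nested list assignment, as a functional update of the table state)
def set3 (T : List (List (List Int))) (i j k : Int) (v : Int) : List (List (List Int)) :=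
  T.modify i.toNat (fun p => p.modify j.toNat (fun r => r.set k.toNat v))

-- the 'while i*i<=n' loop of is_prime
def isPrimeLoop (n i : Int) : Bool :=
  if _h : i * i ≤ n then
    if PySem.Int.mod n i == 0 then false
    else isPrimeLoop n (i + 2)
  else true
termination_by (n + 1 - i).toNat
decreasing_by
  have h0 : 0 ≤ i * i := mul_self_nonneg i
  have h1 : i ≤ 0 ∨ i ≤ n := by
    by_cases hi : i ≤ 0
    · exact Or.inl hi
    · have hi1 : 1 ≤ i := by omega
      right; nlinarith [hi1]
  omega

def isPrime (n : Int) : Bool :=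
  if n == 2 then true
  else if PySem.Int.mod n 2 == 0 then false
  else isPrimeLoop n 3

def isNotPrime (n : Int) : Bool :=
  if n == 0 || n == 1 then false else !(isPrime n)

-- the triple in-place transformation loop of find (shared verbatim by both Pythons)
def transform (T : List (List (List Int))) : List (List (List Int)) :=
  (PySem.List.pyRange 0 (T.length : Int) 1).foldl (fun A i =>
    (PySem.List.pyRange 0 (T.length : Int) 1).foldl (fun A j =>
      (PySem.List.pyRange 0 (T.length : Int) 1).foldl (fun A k =>
        set3 A i j k (if isNotPrime (getCell A i j k) then 1 else 0)) A) A) T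

def condition (T : List (List (List Int))) (x y z : Int) : Int :=
  [(x+1,y), (x-1,y), (x,y-1), (x,y+1), (x+1,y+1), (x+1,y-1), (x-1,y-1), (x-1,y+1)].foldl
    (fun cnt ij => if getCell T ij.1 ij.2 z ≠ 0 then cnt + 1 else cnt) 0

def currCount (T : List (List (List Int))) (n z : Int) : Int :=
  (PySem.List.pyRange 1 (n-1) 1).foldl (fun c x =>
    (PySem.List.pyRange 1 (n-1) 1).foldl (fun c y =>
      if condition T x y z ≥ 6 then c + 1 else c) c) 0

def findLoop (T : List (List (List Int))) (n : Int) (zs : List Int) (levelCount : Int) : Bool :=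
  match zs with
  | [] => true
  | z :: rest =>
    let curr := currCount T n z
    if levelCount = -1 then findLoop T n rest curr
    else if levelCount ≠ curr then false
    else findLoop T n rest levelCount

def find (T : List (List (List Int))) : Bool :=
  findLoop (transform T) (T.length : Int)
    (PySem.List.pyRange 0 (T.length : Int) 1) (-1)

-- ===== PORT B =====
-- S[x][y] / H[x][y] lookup
def getCell2 (S : List (List Int)) (x y : Int) : Int :=
  PySem.List.pyGetD (PySem.List.pyGetD S x []) y 0

-- S = [[1 if T[x][y][z] else 0 for y in range(n)] for x in range(n)]
def sliceB (T : List (List (List Int))) (n z : Int) : List (List Int) :=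
  (PySem.List.pyRange 0 n 1).map (fun x =>
    (PySem.List.pyRange 0 n 1).map (fun y => if getCell T x y z ≠ 0 then (1 : Int) else 0))

-- H = [[S[x][y-1] + S[x][y] + S[x][y+1] for y in range(1, n-1)] for x in range(n)]
def hsumB (S : List (List Int)) (n : Int) : List (List Int) :=
  (PySem.List.pyRange 0 n 1).map (fun x =>
    (PySem.List.pyRange 1 (n-1) 1).map (fun y =>
      getCell2 S x (y-1) + getCell2 S x y + getCell2 S x (y+1)))

def countB (T : List (List (List Int))) (n z : Int) : Int :=
  let S := sliceB T n z
  let H := hsumB S n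
  (PySem.List.pyRange 1 (n-1) 1).foldl (fun c x =>
    (PySem.List.pyRange 1 (n-1) 1).foldl (fun c y =>
      if getCell2 H (x-1) (y-1) + getCell2 H x (y-1) + getCell2 H (x+1) (y-1)
         - getCell2 S x y ≥ 6 then c + 1 else c) c) 0

def find_alt (T : List (List (List Int))) : Bool :=
  let T1 := transform T
  let counts := (PySem.List.pyRange 0 (T.length : Int) 1).map (fun z => countB T1 (T.length : Int) z)
  match counts with
  | [] => true
  | c0 :: _ => counts.all (fun c => c == c0)

-- ===== PRECONDITION & SPEC =====
-- A indexes T[i][j][k] for all i,j,k < len(T): it raises IndexError unless every row/cell list has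
-- length at least len(T); Pre_find admits exactly the inputs where A returns.
def Pre_find (T : List (List (List Int))) : Prop :=
  ∀ p ∈ T, T.length ≤ p.length ∧ ∀ r ∈ p.take T.length, T.length ≤ r.length
instance (T : List (List (List Int))) : Decidable (Pre_find T) := by unfold Pre_find; infer_instance

def pvWitness_find : List (List (List Int)) := [[[2]]]

def Spec_find (T : List (List (List Int))) (out : Bool) : Prop := out = find_alt T
instance (T : List (List (List Int))) (out : Bool) : Decidable (Spec_find T out) := by unfold Spec_find; infer_instance

-- ===== CLAIM (what is proved, stated in full; the proofs are below) =====
def Claim_equal_find : Prop := ∀ (T : List (List (List Int))), Dom_find T → Pre_find T → Spec_find T (find T)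

-- ===== LEMMAS AND PROOFS =====

lemma sliceB_get (T : List (List (List Int))) (n z x y : Int)
    (h0x : 0 ≤ x) (hx : x < n) (h0y : 0 ≤ y) (hy : y < n) :
    getCell2 (sliceB T n z) x y = if getCell T x y z ≠ 0 then 1 else 0 := by
  unfold sliceB getCell2
  rw [PySem.List.pyGetD_map_pyRange_of_nonneg _ n x _ h0x hx,
      PySem.List.pyGetD_map_pyRange_of_nonneg _ n y _ h0y hy]

lemma hsumB_get (S : List (List Int)) (n x y : Int)
    (h0x : 0 ≤ x) (hx : x < n) (h1y : 1 ≤ y) (hy : y < n - 1) :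
    getCell2 (hsumB S n) x (y - 1) = getCell2 S x (y-1) + getCell2 S x y + getCell2 S x (y+1) := by
  unfold hsumB getCell2
  rw [PySem.List.pyGetD_map_pyRange_of_nonneg _ n x _ h0x hx]
  have hk : (y - 1) = (((y-1).toNat : Nat) : Int) := (Int.toNat_of_nonneg (by omega)).symm
  rw [hk, PySem.List.pyGetD_map_pyRange_one _ 1 (n-1) (y-1).toNat _ (by omega)]
  have hy' : (1 : Int) + (((y-1).toNat : Nat) : Int) = y := by omega
  rw [hy', ← hk]

lemma ite_add_one_int (p : Prop) [Decidable p] (acc : Int) :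
    (if p then acc + 1 else acc) = acc + (if p then (1 : Int) else 0) := by
  split_ifs <;> ring

lemma block_eq_condition (T : List (List (List Int))) (n x y z : Int)
    (hx1 : 1 ≤ x) (hx2 : x < n - 1) (hy1 : 1 ≤ y) (hy2 : y < n - 1) :
    getCell2 (hsumB (sliceB T n z) n) (x-1) (y-1) + getCell2 (hsumB (sliceB T n z) n) x (y-1)
      + getCell2 (hsumB (sliceB T n z) n) (x+1) (y-1) - getCell2 (sliceB T n z) x y
    = condition T x y z := by
  rw [hsumB_get _ n (x-1) y (by omega) (by omega) hy1 hy2,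
      hsumB_get _ n x y (by omega) (by omega) hy1 hy2,
      hsumB_get _ n (x+1) y (by omega) (by omega) hy1 hy2,
      sliceB_get T n z (x-1) (y-1) (by omega) (by omega) (by omega) (by omega),
      sliceB_get T n z (x-1) y (by omega) (by omega) (by omega) (by omega),
      sliceB_get T n z (x-1) (y+1) (by omega) (by omega) (by omega) (by omega),
      sliceB_get T n z x (y-1) (by omega) (by omega) (by omega) (by omega),
      sliceB_get T n z x y (by omega) (by omega) (by omega) (by omega),
      sliceB_get T n z x (y+1) (by omega) (by omega) (by omega) (by omega),
      sliceB_get T n z (x+1) (y-1) (by omega) (by omega) (by omega) (by omega),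
      sliceB_get T n z (x+1) y (by omega) (by omega) (by omega) (by omega),
      sliceB_get T n z (x+1) (y+1) (by omega) (by omega) (by omega) (by omega)]
  simp only [condition, List.foldl]
  simp only [ite_add_one_int]
  ring

lemma countB_eq_currCount (T : List (List (List Int))) (n z : Int) :
    countB T n z = currCount T n z := by
  unfold countB currCount
  apply PySem.List.foldl_congr_mem
  intro acc x hx
  apply PySem.List.foldl_congr_mem
  intro acc' y hy
  rw [PySem.List.mem_pyRange_one] at hx hy
  rw [block_eq_condition T n x y z hx.1 (by omega) hy.1 (by omega)]

lemma foldl_le_int (l : List Int) (f : Int → Int → Int) (h : ∀ c x, c ≤ f c x) :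
    ∀ c : Int, c ≤ l.foldl f c := by
  induction l with
  | nil => intro c; simp
  | cons a t ih => intro c; exact le_trans (h c a) (ih _)

lemma currCount_nonneg (T : List (List (List Int))) (n z : Int) : 0 ≤ currCount T n z := by
  unfold currCount
  apply foldl_le_int
  intro c x
  apply foldl_le_int
  intro c' y
  split_ifs <;> omega

lemma findLoop_eq_all (T : List (List (List Int))) (n : Int) (zs : List Int) (lc : Int)
    (hlc : 0 ≤ lc) :
    findLoop T n zs lc = zs.all (fun z => currCount T n z == lc) := by
  induction zs with
  | nil => simp [findLoop]
  | cons z rest ih =>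
    have hne : ¬ (lc = -1) := by omega
    by_cases hc : lc = currCount T n z
    · simp [findLoop, hne, ← hc, ih]
    · simp [findLoop, hne, hc, Ne.symm hc]

lemma find_eq_find_alt (T : List (List (List Int))) : find T = find_alt T := by
  simp only [find, find_alt, countB_eq_currCount]
  rcases Nat.eq_zero_or_pos T.length with h0 | hpos
  · rw [h0]
    norm_num [PySem.List.pyRange_one_eq_nil (le_refl (0 : Int)), findLoop]
  · have h0 : (0 : Int) < (T.length : Int) := by exact_mod_cast hpos
    rw [PySem.List.pyRange_one_cons h0]
    simp only [findLoop, List.map_cons]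
    rw [findLoop_eq_all _ _ _ _ (currCount_nonneg _ _ _)]
    simp only [List.all_cons, List.all_map, beq_self_eq_true, Bool.true_and]
    rfl

-- ===== VERDICT (by name: the statement is the Claim_ definition above) =====
theorem find_spec : Claim_equal_find := by
  intro T _ _
  unfold Spec_find
  exact find_eq_find_alt T
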